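-- pv_equiv track=rewrite | github.com/alouani-org/mecanics-of-llms | 06_react_agent_bonus.py | _parse_action
-- ===== SOURCE A (Python) =====
-- from typing import Callable, Dict, Any, Optional
--
-- def _parse_action(response: str) -> tuple[str, Optional[str]]:
--     """Parse the LLM response to extract the action."""
--     lines = response.strip().split("\n")
--
--     thought = None
--     action = None
--
--     for line in lines:
--         if line.startswith("Thought:"):
--             thought = line.replace("Thought:", "").strip()
--         elif line.startswith("Action:"):
--             action = line.replace("Action:", "").strip()
--
--     return action, thought
-- ===== SOURCE B (Python) =====
-- from typing import Optional
--
-- def _parse_action(response: str) -> tuple[str, Optional[str]]: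
--     """Parse the LLM response to extract the action (backward scan, first hit wins)."""
--     thought = None
--     action = None
--     for line in reversed(response.strip().split("\n")):
--         if action is None and line.startswith("Action:"):
--             action = line.replace("Action:", "").strip()
--         if thought is None and line.startswith("Thought:"):
--             thought = line.replace("Thought:", "").strip()
--         if action is not None and thought is not None:
--             break
--     return action, thought
-- ===== Notes on version B (the rewrite author's own statement) =====
-- stated objective: alternative
-- what changed: Replaces A's forward last-wins scan by a backward scan that keeps the first matching 'Action:'/'Thought:' line and breaks as soon as both are found.
import Mathlib
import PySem

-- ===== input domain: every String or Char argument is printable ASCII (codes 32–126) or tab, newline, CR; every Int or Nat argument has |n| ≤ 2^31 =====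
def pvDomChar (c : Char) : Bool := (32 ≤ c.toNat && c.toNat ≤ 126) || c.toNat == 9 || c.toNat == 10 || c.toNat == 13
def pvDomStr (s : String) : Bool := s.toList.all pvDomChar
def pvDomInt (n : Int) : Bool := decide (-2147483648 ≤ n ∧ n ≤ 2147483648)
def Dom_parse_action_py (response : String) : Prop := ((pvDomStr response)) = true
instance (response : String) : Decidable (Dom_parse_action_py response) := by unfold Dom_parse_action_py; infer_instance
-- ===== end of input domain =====

-- B scans the lines backwards, keeping the first 'Action:'/'Thought:' hit and breaking once both
-- are found, instead of A's forward last-wins scan; same extraction, same results (alternative).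

-- ===== PORT A =====
-- extraction helpers shared by both ports (they are the very same Python expressions in A and B):
-- line.replace("Thought:", "").strip()  /  line.replace("Action:", "").strip()
def pvExT (line : String) : String := PySem.Str.strip (PySem.Str.replace line "Thought:" "")
def pvExA (line : String) : String := PySem.Str.strip (PySem.Str.replace line "Action:" "")

-- A's loop body; state is (thought, action) in the order A declares them
def pvStepA (st : Option String × Option String) (line : String) : Option String × Option String :=
  if PySem.Str.startswith line "Thought:" then (some (pvExT line), st.2)
  else if PySem.Str.startswith line "Action:" then (st.1, some (pvExA line))
  else st

def parse_action_py (response : String) : Option String × Option String :=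
  -- split? is always `some` here (the separator "\n" is nonempty), so .getD [] is exact
  let lines := (PySem.Str.split? (PySem.Str.strip response) "\n").getD []
  let st := lines.foldl pvStepA (none, none)
  (st.2, st.1)

-- ===== PORT B =====
-- backward scan with early exit: first match wins, stop once both are set
def pvLoopB : List String → Option String → Option String → Option String × Option String
  | [], action, thought => (action, thought)
  | line :: rest, action, thought =>
    let action := if action.isNone && PySem.Str.startswith line "Action:" then some (pvExA line) else action
    let thought := if thought.isNone && PySem.Str.startswith line "Thought:" then some (pvExT line) else thought
    if action.isSome && thought.isSome then (action, thought)
    else pvLoopB rest action thought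

def parse_action_py_alt (response : String) : Option String × Option String :=
  pvLoopB ((PySem.Str.split? (PySem.Str.strip response) "\n").getD []).reverse none none

-- ===== PRECONDITION & SPEC =====
def Spec_parse_action_py (response : String) (out : Option String × Option String) : Prop := out = parse_action_py_alt response
instance (response : String) (out : Option String × Option String) : Decidable (Spec_parse_action_py response out) := by unfold Spec_parse_action_py; infer_instance

-- ===== CLAIM (what is proved, stated in full; the proofs are below) =====
def Claim_equal_parse_action_py : Prop := ∀ (response : String), Dom_parse_action_py response → Spec_parse_action_py response (parse_action_py response)

-- ===== LEMMAS AND PROOFS =====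

-- the value a single line contributes for action / thought (none if the prefix is absent)
def pvFA (line : String) : Option String :=
  if PySem.Str.startswith line "Action:" then some (pvExA line) else none
def pvFT (line : String) : Option String :=
  if PySem.Str.startswith line "Thought:" then some (pvExT line) else none

-- a line cannot start with both "Thought:" and "Action:"
theorem pvDisj (l : String) (h : PySem.Str.startswith l "Thought:" = true) :
    PySem.Str.startswith l "Action:" = false := by
  by_contra hc
  rw [Bool.not_eq_false] at hc
  rw [PySem.Str.startswith_eq, PySem.Chars.startswith_iff] at h hc
  rcases h with ⟨u, hu⟩
  rcases hc with ⟨v, hv⟩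
  rw [← hu] at hv
  rw [show ("Thought:".toList) = ['T','h','o','u','g','h','t',':'] from rfl,
      show ("Action:".toList) = ['A','c','t','i','o','n',':'] from rfl] at hv
  simp at hv

theorem pvFindSome_singleton (f : String → Option String) (x : String) :
    List.findSome? f [x] = f x := by
  rw [List.findSome?_cons]
  cases f x <;> simp

-- B's backward loop computes "existing value, else first match in the remaining suffix"
theorem pvLoopB_eq (ls : List String) : ∀ (a t : Option String),
    pvLoopB ls a t = (a.or (ls.findSome? pvFA), t.or (ls.findSome? pvFT)) := by
  induction ls with
  | nil => intro a t; simp [pvLoopB]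
  | cons l ls ih =>
    intro a t
    have ha : (if (a.isNone && PySem.Str.startswith l "Action:") = true
          then some (pvExA l) else a) = a.or (pvFA l) := by
      cases a <;> unfold pvFA <;>
        by_cases h : PySem.Str.startswith l "Action:" = true <;> simp_all [Option.or]
    have ht : (if (t.isNone && PySem.Str.startswith l "Thought:") = true
          then some (pvExT l) else t) = t.or (pvFT l) := by
      cases t <;> unfold pvFT <;>
        by_cases h : PySem.Str.startswith l "Thought:" = true <;> simp_all [Option.or]
    simp only [pvLoopB, ha, ht, ih, List.findSome?_cons]
    cases a <;> cases hfa : pvFA l <;> cases t <;> cases hft : pvFT l <;>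
      simp_all [Option.or]

-- A's forward fold computes "last match, else the incoming value" (= first match of the reverse)
theorem pvFoldA_eq (ls : List String) : ∀ (t a : Option String),
    ls.foldl pvStepA (t, a)
      = ((ls.reverse.findSome? pvFT).or t, (ls.reverse.findSome? pvFA).or a) := by
  induction ls with
  | nil => intro t a; simp
  | cons l ls ih =>
    intro t a
    have hstep : pvStepA (t, a) l = ((pvFT l).or t, (pvFA l).or a) := by
      unfold pvStepA pvFT pvFA
      split_ifs with h1 h2 h3
      · exact absurd ((pvDisj l h1).symm.trans h2) (by simp)
      · rfl
      · rfl
      · rfl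
    rw [List.foldl_cons, hstep, ih, List.reverse_cons, List.findSome?_append,
        List.findSome?_append, pvFindSome_singleton, pvFindSome_singleton,
        Option.or_assoc, Option.or_assoc]

-- ===== VERDICT (by name: the statement is the Claim_ definition above) =====
theorem parse_action_py_spec : Claim_equal_parse_action_py := by
  intro response _
  simp only [Spec_parse_action_py, parse_action_py, parse_action_py_alt]
  rw [pvFoldA_eq, pvLoopB_eq]
  simp
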